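-- pv_equiv track=rewrite | github.com/ijanos/advent2017 | python/day14/converter.py | knot
-- ===== SOURCE A (Python) =====
-- from collections import deque, defaultdict
-- from itertools import islice
--
-- def knot(key):
--     key = [ord(n) for n in key]
--     key += [17, 31, 73, 47, 23]
--
--     LIST = deque(range(256))
--     SKIP = 0
--     rotate_sum = 0
--
--     for _ in range(64):
--         for length in key:
--             head = []
--             for _ in range(length):
--                 head.append(LIST.popleft())
--             LIST.extendleft(head)
--             LIST.rotate(-(length + SKIP))
--             rotate_sum += length + SKIP
--             SKIP += 1
--
--     LIST.rotate(rotate_sum)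
--     dense = []
--     for i in range(16):
--         element = 0
--         for n in islice(LIST, i*16, i*16+16):
--             element ^= n
--         dense.append(element)
--     return dense
-- ===== SOURCE B (Python) =====
-- def knot(key):
--     lengths = [ord(c) for c in key] + [17, 31, 73, 47, 23]
--     vals = list(range(256))
--     pos = 0
--     skip = 0
--     for _ in range(64):
--         for length in lengths:
--             end = pos + length
--             if end <= 256:
--                 vals[pos:end] = vals[pos:end][::-1]
--             else:
--                 seg = (vals[pos:] + vals[:end - 256])[::-1]
--                 cut = 256 - pos
--                 vals[pos:] = seg[:cut]
--                 vals[:end - 256] = seg[cut:]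
--             pos = (pos + length + skip) % 256
--             skip += 1
--     dense = []
--     for i in range(16):
--         x = 0
--         for v in vals[16 * i:16 * i + 16]:
--             x ^= v
--         dense.append(x)
--     return dense
-- ===== Notes on version B (the rewrite author's own statement) =====
-- stated objective: faster
-- what changed: Replaces A's deque popleft/extendleft/rotate choreography (plus a rotate_sum counter to undo all rotations at the end) with a plain fixed list, an explicit position and skip counter, reversing each cyclic segment in place by slice assignment (split in two when it wraps); the dense hash is then read off in natural order with no final rotation.
import Mathlib
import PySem

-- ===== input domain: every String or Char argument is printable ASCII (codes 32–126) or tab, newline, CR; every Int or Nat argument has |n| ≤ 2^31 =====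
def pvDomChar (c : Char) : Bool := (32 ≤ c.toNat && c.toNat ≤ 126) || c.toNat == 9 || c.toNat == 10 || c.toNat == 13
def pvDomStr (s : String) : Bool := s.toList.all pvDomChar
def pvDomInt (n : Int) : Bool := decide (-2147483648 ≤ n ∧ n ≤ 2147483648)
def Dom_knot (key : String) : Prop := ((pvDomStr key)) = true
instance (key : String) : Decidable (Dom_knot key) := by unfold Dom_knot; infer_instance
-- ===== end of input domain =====

-- B replaces A's deque popleft/extendleft/rotate dance by a plain list with an explicit
-- position and skip counter, reversing each cyclic segment in place by slice assignment
-- (measurably faster by a constant factor); same return value on the stated domain.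

-- ===== PORT A =====
-- deque.rotate(-n) for a nonempty deque: left rotation by n (deque reduces n mod the length)
def rotlA (n : Nat) (xs : List Int) : List Int :=
  xs.drop (n % xs.length) ++ xs.take (n % xs.length)

-- deque.rotate(n) for a nonempty deque: right rotation by n
def rotrA (n : Nat) (xs : List Int) : List Int :=
  xs.drop (xs.length - n % xs.length) ++ xs.take (xs.length - n % xs.length)

-- one inner-loop body of A: state (LIST, SKIP, rotate_sum), one length L.
-- head = L poplefts (take; L ≤ 256 on the admitted domain, so no IndexError);
-- extendleft head = head.reverse ++ rest; then rotate(-(L+SKIP)).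
def stepA (st : List Int × Nat × Nat) (L : Nat) : List Int × Nat × Nat :=
  match st with
  | (l, s, r) => (rotlA (L + s) ((l.take L).reverse ++ l.drop L), s + 1, r + L + s)

def knot (key : String) : List Int :=
  let ks := key.toList.map (fun c => c.toNat) ++ [17, 31, 73, 47, 23]
  let st := (List.range 64).foldl (fun st _ => ks.foldl stepA st)
              ((List.range 256).map Int.ofNat, 0, 0)
  let fin := rotrA st.2.2 st.1
  -- islice(LIST, i*16, i*16+16) = take 16 after drop (i*16)
  (List.range 16).map (fun i => ((fin.drop (i*16)).take 16).foldl (fun e n => Int.xor e n) 0)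

-- ===== PORT B =====
-- one inner-loop body of B: state (vals, pos, skip).  Python's in-range nonnegative list
-- slicing / slice assignment is modelled with take/drop (exact there); the locals
-- seg = (vals[pos:] + vals[:end-256])[::-1] and cut = 256 - pos are inlined.
def stepB (st : List Int × Nat × Nat) (L : Nat) : List Int × Nat × Nat :=
  match st with
  | (xs, p, s) =>
    (if p + L ≤ 256 then
       -- vals[pos:end] = vals[pos:end][::-1]
       xs.take p ++ (((xs.drop p).take L).reverse ++ xs.drop (p + L))
     else
       -- vals[pos:] = seg[:cut]  then  vals[:end-256] = seg[cut:]
       (xs.drop p ++ xs.take (p + L - 256)).reverse.drop (256 - p) ++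
         (xs.take p ++ (xs.drop p ++ xs.take (p + L - 256)).reverse.take (256 - p)).drop
           (p + L - 256),
     (p + L + s) % 256, s + 1)

def knot_alt (key : String) : List Int :=
  let ks := key.toList.map (fun c => c.toNat) ++ [17, 31, 73, 47, 23]
  let st := (List.range 64).foldl (fun st _ => ks.foldl stepB st)
              ((List.range 256).map Int.ofNat, 0, 0)
  -- vals[16*i : 16*i+16] = take 16 after drop (16*i) (nonnegative in-range slice)
  (List.range 16).map (fun i => ((st.1.drop (16*i)).take 16).foldl (fun x v => Int.xor x v) 0)

-- ===== PRECONDITION & SPEC =====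
def Spec_knot (key : String) (out : List Int) : Prop := out = knot_alt key
instance (key : String) (out : List Int) : Decidable (Spec_knot key out) := by unfold Spec_knot; infer_instance

-- ===== CLAIM (what is proved, stated in full; the proofs are below) =====
def Claim_equal_knot : Prop := ∀ (key : String), Dom_knot key → Spec_knot key (knot key)

-- ===== LEMMAS AND PROOFS =====

-- A's deque equals B's array read cyclically from pos; SKIP = skip; pos = rotate_sum % 256.
def RelAB (a b : List Int × Nat × Nat) : Prop :=
  a.1.length = 256 ∧ b.1.length = 256 ∧ a.2.1 = b.2.2 ∧ b.2.1 = a.2.2 % 256 ∧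
  ∀ i, i < 256 → a.1.getD i 0 = b.1.getD ((b.2.1 + i) % 256) 0

lemma rotrA_length (n : Nat) (xs : List Int) : (rotrA n xs).length = xs.length := by
  simp [rotrA]

lemma rotlA_length (n : Nat) (xs : List Int) : (rotlA n xs).length = xs.length := by
  simp [rotlA]; omega

lemma rotlA_getD (n : Nat) (xs : List Int) (h : xs.length = 256) (i : Nat) (hi : i < 256) :
    (rotlA n xs).getD i 0 = xs.getD ((i + n) % 256) 0 := by
  have hk : n % 256 < 256 := Nat.mod_lt _ (by omega)
  simp only [rotlA, h, List.getD_eq_getElem?_getD]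
  by_cases hc : i < 256 - n % 256
  · rw [List.getElem?_append_left (by simp [h]; omega), List.getElem?_drop]
    have he : n % 256 + i = (i + n) % 256 := by omega
    rw [he]
  · rw [List.getElem?_append_right (by simp [h]; omega)]
    simp only [List.length_drop, h]
    rw [List.getElem?_take_of_lt (by omega)]
    have he : i - (256 - n % 256) = (i + n) % 256 := by omega
    rw [he]

lemma rotrA_getD (n : Nat) (xs : List Int) (h : xs.length = 256) (i : Nat) (hi : i < 256) :
    (rotrA n xs).getD i 0 = xs.getD ((i + 256 - n % 256) % 256) 0 := by
  have hk : n % 256 < 256 := Nat.mod_lt _ (by omega)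
  simp only [rotrA, h, List.getD_eq_getElem?_getD]
  by_cases hc : i < n % 256
  · rw [List.getElem?_append_left (by simp [h]; omega), List.getElem?_drop]
    have he : 256 - n % 256 + i = (i + 256 - n % 256) % 256 := by omega
    rw [he]
  · rw [List.getElem?_append_right (by simp [h]; omega)]
    simp only [List.length_drop, h]
    rw [List.getElem?_take_of_lt (by omega)]
    have he : i - (256 - (256 - n % 256)) = (i + 256 - n % 256) % 256 := by omega
    rw [he]

lemma stepA_getD (l : List Int) (s r L : Nat) (hl : l.length = 256) (hL : L ≤ 256)
    (i : Nat) (hi : i < 256) :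
    (stepA (l, s, r) L).1.getD i 0 =
      (if (i + (L + s)) % 256 < L then l.getD (L - 1 - (i + (L + s)) % 256) 0
       else l.getD ((i + (L + s)) % 256) 0) := by
  have hlt : (l.take L).length = L := by simp [hl]; omega
  have hm : ((l.take L).reverse ++ l.drop L).length = 256 := by simp [hl]; omega
  show (rotlA (L + s) _).getD i 0 = _
  rw [rotlA_getD _ _ hm i hi]
  have hk : (i + (L + s)) % 256 < 256 := by omega
  simp only [List.getD_eq_getElem?_getD]
  by_cases hc : (i + (L + s)) % 256 < L
  · rw [if_pos hc, List.getElem?_append_left (by simp [hlt]; omega),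
      List.getElem?_reverse (by rw [hlt]; omega), hlt,
      List.getElem?_take_of_lt (by omega)]
  · rw [if_neg hc, List.getElem?_append_right (by simp [hlt]; omega)]
    simp only [List.length_reverse, hlt]
    rw [List.getElem?_drop]
    have he : L + ((i + (L + s)) % 256 - L) = (i + (L + s)) % 256 := by omega
    rw [he]

lemma stepB_getD (xs : List Int) (p s L : Nat) (hx : xs.length = 256) (hp : p < 256)
    (hL : L ≤ 256) (j : Nat) (hj : j < 256) :
    (stepB (xs, p, s) L).1.getD j 0 =
      (if (j + 256 - p) % 256 < L then xs.getD ((p + (L - 1 - (j + 256 - p) % 256)) % 256) 0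
       else xs.getD j 0) := by
  simp only [stepB, List.getD_eq_getElem?_getD]
  by_cases he : p + L ≤ 256
  · rw [if_pos he]
    by_cases h1 : j < p
    · rw [if_neg (by omega)]
      rw [List.getElem?_append_left (by simp [hx]; omega), List.getElem?_take_of_lt h1]
    · by_cases h2 : j < p + L
      · have hd : (j + 256 - p) % 256 = j - p := by omega
        rw [hd, if_pos (by omega)]
        rw [List.getElem?_append_right (by simp [hx]; omega)]
        rw [List.getElem?_append_left (by simp [hx]; omega)]
        rw [List.getElem?_reverse (by simp [hx]; omega)]
        simp only [List.length_take, List.length_drop, hx]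
        rw [List.getElem?_take_of_lt (by omega), List.getElem?_drop]
        congr 2
        omega
      · have hd : (j + 256 - p) % 256 = j - p := by omega
        rw [hd, if_neg (by omega)]
        rw [List.getElem?_append_right (by simp [hx]; omega)]
        rw [List.getElem?_append_right (by simp [hx]; omega)]
        simp only [List.length_reverse, List.length_take, List.length_drop, hx]
        rw [List.getElem?_drop]
        congr 2
        omega
  · rw [if_neg he]
    have hwl : (xs.drop p ++ xs.take (p + L - 256)).length = L := by simp [hx]; omega
    have hw : ∀ t, t < L →
        (xs.drop p ++ xs.take (p + L - 256))[t]? = xs[(p + t) % 256]? := by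
      intro t ht
      by_cases htc : t < 256 - p
      · rw [List.getElem?_append_left (by simp [hx]; omega), List.getElem?_drop]
        congr 2
        omega
      · rw [List.getElem?_append_right (by simp [hx]; omega)]
        simp only [List.length_drop, hx]
        rw [List.getElem?_take_of_lt (by omega)]
        congr 2
        omega
    by_cases h1 : j < p + L - 256
    · have hd : (j + 256 - p) % 256 = j + 256 - p := by omega
      rw [hd, if_pos (by omega)]
      rw [List.getElem?_append_left (by simp [hx]; omega), List.getElem?_drop]
      rw [List.getElem?_reverse (by rw [hwl]; omega), hwl]
      rw [hw _ (by omega)]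
      congr 2
      omega
    · rw [List.getElem?_append_right (by simp; omega)]
      rw [List.getElem?_drop]
      have hix : (xs.take p ++ (xs.drop p ++ xs.take (p + L - 256)).reverse.take (256 - p)).length
          = 256 := by simp [hx]; omega
      have hjj : p + L - 256 + (j - ((xs.drop p ++ xs.take (p + L - 256)).reverse.drop (256 - p)).length) = j := by
        simp; omega
      rw [hjj]
      by_cases h2 : j < p
      · have hd : (j + 256 - p) % 256 = j + 256 - p := by omega
        rw [hd, if_neg (by omega)]
        rw [List.getElem?_append_left (by simp [hx]; omega), List.getElem?_take_of_lt h2]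
      · have hd : (j + 256 - p) % 256 = j - p := by omega
        rw [hd, if_pos (by omega)]
        rw [List.getElem?_append_right (by simp [hx]; omega)]
        rw [List.getElem?_take_of_lt (by simp [hx]; omega)]
        rw [List.getElem?_reverse (by rw [hwl]; simp [hx]; omega), hwl]
        rw [hw _ (by simp [hx]; omega)]
        congr 2
        simp [hx]
        omega
lemma step_rel (a b : List Int × Nat × Nat) (L : Nat) (hL : L ≤ 256) (h : RelAB a b) :
    RelAB (stepA a L) (stepB b L) := by
  obtain ⟨l, s, r⟩ := a
  obtain ⟨xs, p, s'⟩ := b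
  obtain ⟨hla, hlb, hss, hpr, hpt⟩ := h
  simp only [RelAB] at *
  have hp : p < 256 := by omega
  subst hss
  refine ⟨?_, ?_, rfl, by simp [stepA, stepB]; omega, ?_⟩
  · simp [stepA, rotlA_length]; omega
  · simp only [stepB]
    split <;> simp [hlb] <;> omega
  · intro i hi
    have hkey := stepA_getD l s r L hla hL i hi
    have hk : (i + (L + s)) % 256 < 256 := by omega
    have hj : ((p + L + s) % 256 + i) % 256 < 256 := by omega
    have hkey2 := stepB_getD xs p s L hlb hp hL (((p + L + s) % 256 + i) % 256) hj
    have h21 : (stepB (xs, p, s) L).2.1 = (p + L + s) % 256 := rfl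
    rw [hkey, h21, hkey2]
    have hd : (((p + L + s) % 256 + i) % 256 + 256 - p) % 256 = (i + (L + s)) % 256 := by
      omega
    rw [hd]
    by_cases hc : (i + (L + s)) % 256 < L
    · rw [if_pos hc, if_pos hc]
      exact hpt _ (by omega)
    · rw [if_neg hc, if_neg hc]
      rw [hpt _ hk]
      congr 1
      omega

lemma fold_rel (ks : List Nat) (hks : ∀ L ∈ ks, L ≤ 256) (a b : List Int × Nat × Nat)
    (h : RelAB a b) : RelAB (ks.foldl stepA a) (ks.foldl stepB b) := by
  induction ks generalizing a b with
  | nil => exact h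
  | cons L t ih =>
    exact ih (fun x hx => hks x (by simp [hx])) _ _ (step_rel a b L (hks L (by simp)) h)

lemma rounds_rel (rounds : List Nat) (ks : List Nat) (hks : ∀ L ∈ ks, L ≤ 256)
    (a b : List Int × Nat × Nat) (h : RelAB a b) :
    RelAB (rounds.foldl (fun st _ => ks.foldl stepA st) a)
        (rounds.foldl (fun st _ => ks.foldl stepB st) b) := by
  induction rounds generalizing a b with
  | nil => exact h
  | cons x t ih => exact ih _ _ (fold_rel ks hks a b h)

lemma ks_bound (key : String) (hd : Dom_knot key) :
    ∀ L ∈ key.toList.map (fun c => c.toNat) ++ [17, 31, 73, 47, 23], L ≤ 256 := by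
  intro L hL
  simp only [List.mem_append, List.mem_map] at hL
  rcases hL with ⟨c, hc, rfl⟩ | h
  · have hchar := List.all_eq_true.mp hd c hc
    simp only [pvDomChar, Bool.or_eq_true, Bool.and_eq_true, beq_iff_eq,
      decide_eq_true_eq] at hchar
    omega
  · simp only [List.mem_cons, List.not_mem_nil, or_false] at h
    rcases h with rfl | rfl | rfl | rfl | rfl <;> omega

lemma final_eq (a b : List Int × Nat × Nat) (h : RelAB a b) :
    (List.range 16).map
      (fun i => (((rotrA a.2.2 a.1).drop (i*16)).take 16).foldl (fun e n => Int.xor e n) 0)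
    = (List.range 16).map
      (fun i => ((b.1.drop (16*i)).take 16).foldl (fun x v => Int.xor x v) 0) := by
  obtain ⟨hla, hlb, hss, hpr, hpt⟩ := h
  have hfin : rotrA a.2.2 a.1 = b.1 := by
    apply List.ext_getElem (by rw [rotrA_length, hla, hlb])
    intro i h1 h2
    have hi : i < 256 := by rw [rotrA_length, hla] at h1; exact h1
    rw [← List.getD_eq_getElem _ 0 h1, ← List.getD_eq_getElem _ 0 h2]
    rw [rotrA_getD _ _ hla i hi]
    rw [hpt _ (by omega)]
    congr 1
    omega
  rw [hfin]
  apply List.map_congr_left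
  intro i _
  rw [Nat.mul_comm]

-- ===== VERDICT (by name: the statement is the Claim_ definition above) =====
theorem knot_spec : Claim_equal_knot := by
  intro key hd
  unfold Spec_knot knot knot_alt
  exact final_eq _ _ (rounds_rel (List.range 64)
    (key.toList.map (fun c : Char => c.toNat) ++ [17, 31, 73, 47, 23]) (ks_bound key hd) _ _
    (by
      refine ⟨by rw [List.length_map, List.length_range],
        by rw [List.length_map, List.length_range], rfl, rfl, ?_⟩
      intro i hi
      show ((List.range 256).map Int.ofNat).getD i 0
        = ((List.range 256).map Int.ofNat).getD ((0 + i) % 256) 0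
      rw [Nat.zero_add, Nat.mod_eq_of_lt hi]))
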